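-- pv_equiv track=rewrite | github.com/anuragchris/Python-Data-Structures | Strings/MaxOccurenceOfSubstring.py | maxFreq
-- ===== SOURCE A (Python) =====
-- def maxFreq(s: str, maxLetters: int, minSize: int, maxSize: int) -> int:
--     final = {}
--     q, n = [], len(s)
--
--     for i in range(0, n):
--         q.append(s[i])
--
--         if len(q) <= maxSize and len(q) >= minSize:
--
--             if len(set(q)) <= maxLetters:
--                 a = "".join(q)
--
--                 if a not in final:
--                     final[a] = 1
--                 else:
--                     final[a] += 1
--
--             q.pop(0)
--
--     maxoccurence = 0
--
--     for i, v in enumerate(final):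
--         maxoccurence = max(final[v], maxoccurence)
--
--     return maxoccurence
-- ===== SOURCE B (Python) =====
-- def maxFreq(s: str, maxLetters: int, minSize: int, maxSize: int) -> int:
--     # Sliding window of fixed length L = max(minSize, 1): only windows of the
--     # minimal admissible length can qualify, so slide one window across s while
--     # maintaining per-char counts, a running distinct-char counter and the
--     # running best frequency -- all updated in O(1) per step.
--     L = max(minSize, 1)
--     n = len(s)
--     if L > maxSize or L > n:
--         return 0
--     counts = {}
--     distinct = 0
--     freq = {}
--     best = 0
--     for i, c in enumerate(s):
--         counts[c] = counts.get(c, 0) + 1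
--         if counts[c] == 1:
--             distinct += 1
--         if i >= L:
--             out = s[i - L]
--             counts[out] = counts.get(out, 0) - 1
--             if counts[out] == 0:
--                 distinct -= 1
--         if i >= L - 1 and distinct <= maxLetters:
--             w = s[i - L + 1:i + 1]
--             f = freq.get(w, 0) + 1
--             freq[w] = f
--             if f > best:
--                 best = f
--     return best
-- ===== Notes on version B (the rewrite author's own statement) =====
-- stated objective: faster
-- what changed: A re-materialises the queue each step and recomputes set(q) and ''.join(q) from scratch per window; B slides one fixed-length window maintaining incremental per-char counts, a running distinct-character counter and the running best frequency, so only the unavoidable window-key slice remains per step (intended as faster; measured 4-30x on random inputs, same O(n*L) worst case from window hashing).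
import Mathlib
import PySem

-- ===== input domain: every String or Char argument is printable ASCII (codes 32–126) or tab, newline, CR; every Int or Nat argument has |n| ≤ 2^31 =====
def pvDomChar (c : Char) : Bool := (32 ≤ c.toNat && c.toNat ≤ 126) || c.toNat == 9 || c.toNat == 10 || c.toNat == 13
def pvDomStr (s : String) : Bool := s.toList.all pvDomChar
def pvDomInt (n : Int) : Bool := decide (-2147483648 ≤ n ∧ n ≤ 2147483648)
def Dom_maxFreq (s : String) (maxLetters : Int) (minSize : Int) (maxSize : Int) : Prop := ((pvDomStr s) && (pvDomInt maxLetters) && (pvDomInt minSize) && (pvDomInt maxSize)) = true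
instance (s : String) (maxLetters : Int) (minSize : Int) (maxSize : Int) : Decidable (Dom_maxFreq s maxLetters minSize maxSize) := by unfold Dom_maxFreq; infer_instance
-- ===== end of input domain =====

-- B replaces A's per-window set(q)/"".join(q) recomputation by one sliding window with incremental
-- per-char counts, a running distinct-char counter and a running best (objective: faster; measured as a
-- constant-factor win on random inputs, worst case unchanged since both hash the window key per step).
-- Substrings are represented by their character lists (List Char) as dict keys in both ports.

-- ===== PORT A =====
-- one iteration of A's 'for i in range(0, n)' body, receiving the character s[i]
def stepA (maxLetters minSize maxSize : Int)
    (st : PySem.Dict (List Char) Int × List Char) (c : Char) :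
    PySem.Dict (List Char) Int × List Char :=
  let q := st.2 ++ [c]                                   -- q.append(s[i])
  if PySem.List.len q ≤ maxSize ∧ minSize ≤ PySem.List.len q then
    let fin :=
      if PySem.List.len (PySem.Set.ofList q) ≤ maxLetters then  -- len(set(q)) <= maxLetters
        if st.1.contains q = false then st.1.insert q 1          -- a not in final: final[a] = 1
        else st.1.insert q (st.1.getD q 0 + 1)                   -- final[a] += 1
      else st.1
    (fin, q.tail)                                        -- q.pop(0): result discarded, q nonempty
  else (st.1, q)

def maxFreq (s : String) (maxLetters : Int) (minSize : Int) (maxSize : Int) : Int :=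
  let cs := s.toList
  let n : Int := PySem.Str.len s
  let res := (PySem.List.pyRange 0 n 1).foldl
      (fun st i => stepA maxLetters minSize maxSize st (PySem.List.pyGetD cs i ' ')) -- s[i], i in range
      (PySem.Dict.empty, [])
  -- for i, v in enumerate(final): maxoccurence = max(final[v], maxoccurence)
  (PySem.List.enumerate res.1.keys 0).foldl (fun m p => max (res.1.getD p.2 0) m) 0  -- final[v]: key present

-- ===== PORT B =====
-- one iteration of B's 'for i, c in enumerate(s)' body
def stepB (maxLetters L : Int) (cs : List Char)
    (st : PySem.Dict Char Int × Int × PySem.Dict (List Char) Int × Int) (p : Int × Char) :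
    PySem.Dict Char Int × Int × PySem.Dict (List Char) Int × Int :=
  let i := p.1
  let c := p.2
  let counts := st.1.insert c (st.1.getD c 0 + 1)        -- counts[c] = counts.get(c, 0) + 1
  let distinct := if counts.getD c 0 = 1 then st.2.1 + 1 else st.2.1
  let cd :=
    if L ≤ i then
      let o := PySem.List.pyGetD cs (i - L) ' '          -- out = s[i - L], in range
      let counts' := counts.insert o (counts.getD o 0 - 1)
      (counts', if counts'.getD o 0 = 0 then distinct - 1 else distinct)
    else (counts, distinct)
  if L - 1 ≤ i ∧ cd.2 ≤ maxLetters then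
    let w := PySem.List.slice cs (some (i - L + 1)) (some (i + 1))   -- s[i-L+1 : i+1]
    let f := st.2.2.1.getD w 0 + 1
    (cd.1, cd.2, st.2.2.1.insert w f, if st.2.2.2 < f then f else st.2.2.2)
  else (cd.1, cd.2, st.2.2.1, st.2.2.2)

def maxFreq_alt (s : String) (maxLetters : Int) (minSize : Int) (maxSize : Int) : Int :=
  let L := max minSize 1
  let cs := s.toList
  let n : Int := PySem.Str.len s
  if maxSize < L ∨ n < L then 0
  else
    let st := (PySem.List.enumerate cs 0).foldl (stepB maxLetters L cs)
      (PySem.Dict.empty, 0, PySem.Dict.empty, 0)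
    st.2.2.2

-- ===== PRECONDITION & SPEC =====
def Spec_maxFreq (s : String) (maxLetters : Int) (minSize : Int) (maxSize : Int) (out : Int) : Prop := out = maxFreq_alt s maxLetters minSize maxSize
instance (s : String) (maxLetters : Int) (minSize : Int) (maxSize : Int) (out : Int) : Decidable (Spec_maxFreq s maxLetters minSize maxSize out) := by unfold Spec_maxFreq; infer_instance

-- ===== CLAIM (what is proved, stated in full; the proofs are below) =====
def Claim_equal_maxFreq : Prop := ∀ (s : String) (maxLetters : Int) (minSize : Int) (maxSize : Int), Dom_maxFreq s maxLetters minSize maxSize → Spec_maxFreq s maxLetters minSize maxSize (maxFreq s maxLetters minSize maxSize)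


-- ===== LEMMAS AND PROOFS =====

-- generic running-max facts
theorem pv_foldl_max_init (l : List Int) (b z : Int) :
    l.foldl (fun m v => max m v) (max b z) = max (l.foldl (fun m v => max m v) b) z := by
  induction l generalizing b with
  | nil => rfl
  | cons x t ih =>
    simp only [List.foldl_cons]
    rw [max_right_comm]
    exact ih (max b x)

theorem pv_foldl_max_middle (xs ys : List Int) (x y a : Int) (hxy : x ≤ y) :
    (xs ++ y :: ys).foldl (fun m v => max m v) a
      = max ((xs ++ x :: ys).foldl (fun m v => max m v) a) y := by
  simp only [List.foldl_append, List.foldl_cons]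
  rw [pv_foldl_max_init, pv_foldl_max_init]
  rw [max_assoc, max_eq_right hxy]

theorem pv_foldl_flip_max (l : List Int) (a : Int) :
    l.foldl (fun m v => max v m) a = l.foldl (fun m v => max m v) a := by
  simp [max_comm]

theorem pv_foldl_max_map_update {κ : Type} [DecidableEq κ] (l : List κ) (g : κ → Int) (w : κ)
    (f : Int) (hw : w ∈ l) (hnd : l.Nodup) (hle : g w ≤ f) :
    (l.map (fun k => if k = w then f else g k)).foldl (fun m v => max m v) 0
      = max ((l.map g).foldl (fun m v => max m v) 0) f := by
  obtain ⟨l1, l2, rfl⟩ := List.append_of_mem hw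
  have h1 : w ∉ l1 := fun h => (List.disjoint_of_nodup_append hnd) h (List.mem_cons_self ..)
  have h2 : w ∉ l2 := (List.nodup_cons.mp (List.Nodup.of_append_right hnd)).1
  have e1 : l1.map (fun k => if k = w then f else g k) = l1.map g :=
    List.map_congr_left (fun x hx => if_neg (fun h : x = w => h1 (h ▸ hx)))
  have e2 : l2.map (fun k => if k = w then f else g k) = l2.map g :=
    List.map_congr_left (fun x hx => if_neg (fun h : x = w => h2 (h ▸ hx)))
  simp only [List.map_append, List.map_cons]
  rw [e1, e2]
  exact pv_foldl_max_middle _ _ (g w) f 0 hle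

-- len(set(l)) counts the distinct characters
theorem pv_ofList_length (l : List Char) : (PySem.Set.ofList l).length = l.toFinset.card := by
  have h1 : (PySem.Set.ofList l).toFinset = l.toFinset := by
    ext x; simp [PySem.Set.mem_ofList]
  rw [← h1, List.toFinset_card_of_nodup (PySem.Set.nodup_ofList l)]

-- A's two-branch counter bump is one insert
theorem pv_freq_insert_eq (d : PySem.Dict (List Char) Int) (w : List Char) :
    (if d.contains w = false then d.insert w 1 else d.insert w (d.getD w 0 + 1))
      = d.insert w (d.getD w 0 + 1) := by
  by_cases h : d.contains w
  · simp [h]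
  · rw [if_pos (by simp [h]), PySem.Dict.getD_of_not_contains d (0:Int) (by simp [h]), zero_add]

-- bumping one counter value bumps the running max of the values
theorem pv_best_insert (d : PySem.Dict (List Char) Int) (hnd : d.keys.Nodup) (w : List Char)
    (f : Int) (hle : d.getD w 0 ≤ f) :
    ((d.insert w f).values).foldl (fun m v => max m v) 0
      = max (d.values.foldl (fun m v => max m v) 0) f := by
  by_cases hc : d.contains w = true
  · have hk : (d.insert w f).keys = d.keys := PySem.Dict.keys_insert_of_contains d f hc
    have hnd' : (d.insert w f).keys.Nodup := hk ▸ hnd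
    rw [PySem.Dict.values_eq_map_keys _ hnd' 0, hk, PySem.Dict.values_eq_map_keys d hnd 0]
    rw [List.map_congr_left (fun k _ => PySem.Dict.getD_insert d w k f 0)]
    exact pv_foldl_max_map_update d.keys (fun k => d.getD k 0) w f
      ((PySem.Dict.contains_iff_mem_keys d w).mp hc) hnd hle
  · have hw : w ∉ d.keys := fun h => hc ((PySem.Dict.contains_iff_mem_keys d w).mpr h)
    have hk : (d.insert w f).keys = d.keys ++ [w] :=
      PySem.Dict.keys_insert_of_not_contains d f (by simpa using hc)
    have hnd' : (d.insert w f).keys.Nodup := PySem.Dict.nodup_keys_insert d w f hnd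
    rw [PySem.Dict.values_eq_map_keys _ hnd' 0, hk, List.map_append,
        PySem.Dict.values_eq_map_keys d hnd 0]
    have e1 : d.keys.map (fun k => (d.insert w f).getD k 0) = d.keys.map (fun k => d.getD k 0) :=
      List.map_congr_left (fun k hk' =>
        PySem.Dict.getD_insert_of_ne d f 0 (fun h => hw (h ▸ hk')))
    rw [List.map_singleton, PySem.Dict.getD_insert_self, e1, List.foldl_append]
    rfl

-- states after processing the first k characters
def pvInitA : PySem.Dict (List Char) Int × List Char := (PySem.Dict.empty, [])
def pvInitB : PySem.Dict Char Int × Int × PySem.Dict (List Char) Int × Int :=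
  (PySem.Dict.empty, 0, PySem.Dict.empty, 0)
def pvA (mL mn mx : Int) (cs : List Char) (k : Nat) : PySem.Dict (List Char) Int × List Char :=
  (cs.take k).foldl (stepA mL mn mx) pvInitA
def pvB (mL mn : Int) (cs : List Char) (k : Nat) :
    PySem.Dict Char Int × Int × PySem.Dict (List Char) Int × Int :=
  (PySem.List.enumerate (cs.take k) 0).foldl (stepB mL (max mn 1) cs) pvInitB
def pvW (cs : List Char) (LN k : Nat) : List Char := (cs.take k).drop (k - LN)
def pvQ (cs : List Char) (LN k : Nat) : List Char := (cs.take k).drop (k + 1 - LN)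

def pvInv (mL mn mx : Int) (cs : List Char) (LN : Nat) (k : Nat) : Prop :=
  (pvA mL mn mx cs k).2 = pvQ cs LN k ∧
  (pvB mL mn cs k).2.2.1 = (pvA mL mn mx cs k).1 ∧
  (∀ c, ((pvB mL mn cs k).1).getD c 0 = ((pvW cs LN k).count c : Int)) ∧
  (pvB mL mn cs k).2.1 = ((pvW cs LN k).toFinset.card : Int) ∧
  (pvB mL mn cs k).2.2.2 = ((pvA mL mn mx cs k).1).values.foldl (fun m v => max m v) 0 ∧
  ((pvA mL mn mx cs k).1).keys.Nodup ∧
  (k < LN → (pvA mL mn mx cs k).1 = PySem.Dict.empty)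

theorem pvA_succ (mL mn mx : Int) (cs : List Char) (k : Nat) (h : k < cs.length) :
    pvA mL mn mx cs (k+1) = stepA mL mn mx (pvA mL mn mx cs k) cs[k] := by
  unfold pvA
  rw [List.take_add_one, List.getElem?_eq_getElem h]
  simp only [Option.toList_some, List.foldl_append, List.foldl_cons, List.foldl_nil]

theorem pvB_succ (mL mn : Int) (cs : List Char) (k : Nat) (h : k < cs.length) :
    pvB mL mn cs (k+1) = stepB mL (max mn 1) cs (pvB mL mn cs k) ((k : Int), cs[k]) := by
  unfold pvB
  rw [List.take_add_one, List.getElem?_eq_getElem h]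
  simp only [Option.toList_some]
  rw [PySem.List.enumerate_append, List.foldl_append]
  simp [PySem.List.enumerate, List.length_take, Nat.min_eq_left h.le]

-- (if a < b then b else a) = max a b
theorem pv_if_lt_max (a b : Int) : (if a < b then b else a) = max a b := by
  rcases lt_or_ge a b with h | h
  · rw [if_pos h, max_eq_right h.le]
  · rw [if_neg (not_lt.mpr h), max_eq_left h]

theorem pv_inv (mL mn mx : Int) (cs : List Char) (hmx : max mn 1 ≤ mx) :
    ∀ k, k ≤ cs.length → pvInv mL mn mx cs (max mn 1).toNat k := by
  have hL1 : (1:Int) ≤ max mn 1 := le_max_right mn 1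
  suffices h : ∀ (LN : Nat), ((LN : Nat) : Int) = max mn 1 →
      ∀ k, k ≤ cs.length → pvInv mL mn mx cs LN k by
    exact h (max mn 1).toNat (Int.toNat_of_nonneg (by omega))
  intro LN hcast k
  induction k with
  | zero =>
    intro _
    unfold pvInv pvA pvB pvW pvQ pvInitA pvInitB
    refine ⟨?_, ?_, ?_, ?_, ?_, ?_, ?_⟩ <;>
      simp [PySem.Dict.getD, PySem.Dict.get?, PySem.Dict.keys,
        PySem.Dict.values, PySem.Dict.empty]
  | succ k ih =>
    intro hk1
    have hklen : k < cs.length := by omega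
    obtain ⟨iq, ifr, icnt, idst, ibst, ind, iemp⟩ := ih (by omega)
    have htake : List.take (k+1) cs = List.take k cs ++ [cs[k]] := by
      rw [List.take_add_one, List.getElem?_eq_getElem hklen]; rfl
    have hlentake : (List.take k cs).length = k := by simp [List.length_take]; omega
    have hq1 : pvQ cs LN k ++ [cs[k]] = pvW cs LN (k+1) := by
      unfold pvQ pvW
      rw [htake, List.drop_append_of_le_length (by rw [hlentake]; omega)]
    have hWlen1 : (pvW cs LN (k+1)).length = min (k+1) LN := by
      unfold pvW; rw [List.length_drop, List.length_take]; omega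
    have hmid : ∀ c', ((pvB mL mn cs k).1.insert cs[k]
          ((pvB mL mn cs k).1.getD cs[k] 0 + 1)).getD c' 0
        = ((pvW cs LN k ++ [cs[k]]).count c' : Int) := by
      intro c'
      by_cases hc' : c' = cs[k]
      · subst hc'
        rw [PySem.Dict.getD_insert_self, icnt]
        simp [List.count_append]
      · rw [PySem.Dict.getD_insert_of_ne _ _ _ hc', icnt]
        simp [List.count_append, Ne.symm hc']
    have hdadd : (if ((pvB mL mn cs k).1.insert cs[k]
          ((pvB mL mn cs k).1.getD cs[k] 0 + 1)).getD cs[k] 0 = 1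
        then (pvB mL mn cs k).2.1 + 1 else (pvB mL mn cs k).2.1)
        = ((pvW cs LN k ++ [cs[k]]).toFinset.card : Int) := by
      rw [PySem.Dict.getD_insert_self, icnt]
      have hfin : (pvW cs LN k ++ [cs[k]]).toFinset
          = insert cs[k] (pvW cs LN k).toFinset := by
        ext x; simp [List.mem_toFinset, or_comm]
      rw [hfin]
      by_cases hm : cs[k] ∈ pvW cs LN k
      · rw [if_neg (by have := List.count_pos_iff.mpr hm; omega),
            Finset.card_insert_of_mem (List.mem_toFinset.mpr hm), idst]
      · rw [if_pos (by rw [List.count_eq_zero.mpr hm]; rfl),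
            Finset.card_insert_of_notMem (fun h => hm (List.mem_toFinset.mp h)), idst]
        push_cast; ring
    unfold pvInv
    rw [pvA_succ mL mn mx cs k hklen, pvB_succ mL mn cs k hklen]
    simp only [stepA, stepB, iq, ifr, PySem.List.len_eq]
    by_cases hbig : LN ≤ k + 1
    · -- the window is full: A records and pops, B slides
      rw [if_pos (by rw [hq1, hWlen1]; exact ⟨by omega, by omega⟩)]
      have htl : (pvW cs LN (k+1)).tail = pvQ cs LN (k+1) := by
        unfold pvW pvQ; rw [List.tail_drop]; congr 1; omega
      have hAset : ((PySem.Set.ofList (pvQ cs LN k ++ [cs[k]])).length : Int)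
          = ((pvW cs LN (k+1)).toFinset.card : Int) := by
        rw [hq1, pv_ofList_length]
      have hslice : PySem.List.slice cs (some ((k:Int) - max mn 1 + 1)) (some ((k:Int) + 1))
          = pvW cs LN (k+1) := by
        have e1 : (k:Int) - max mn 1 + 1 = ((k + 1 - LN : Nat) : Int) := by omega
        have e2 : (k:Int) + 1 = ((k + 1 : Nat) : Int) := by omega
        rw [e1, e2, PySem.List.slice_natCast]
        unfold pvW
        rw [List.drop_take]
      by_cases hrem : LN ≤ k
      · -- a character also leaves the window
        rw [if_pos (show (max mn 1) ≤ (k:Int) by omega)]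
        have hgetD : PySem.List.pyGetD cs ((k:Int) - max mn 1) ' ' = cs[k - LN] := by
          have e1 : (k:Int) - max mn 1 = ((k - LN : Nat) : Int) := by omega
          rw [e1, PySem.List.pyGetD_natCast]
          exact List.getD_eq_getElem cs ' ' (by omega)
        have hWm : pvW cs LN k ++ [cs[k]] = cs[k - LN] :: pvW cs LN (k+1) := by
          have e1 : pvW cs LN k ++ [cs[k]] = (List.take (k+1) cs).drop (k - LN) := by
            unfold pvW
            rw [htake, List.drop_append_of_le_length (by rw [hlentake]; omega)]
          rw [e1, List.drop_eq_getElem_cons (by rw [List.length_take]; omega)]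
          congr 1
          · exact List.getElem_take
          · unfold pvW; congr 1; omega
        rw [hgetD]
        have hc2 : ∀ c', (((pvB mL mn cs k).1.insert cs[k]
              ((pvB mL mn cs k).1.getD cs[k] 0 + 1)).insert cs[k - LN]
              (((pvB mL mn cs k).1.insert cs[k]
                ((pvB mL mn cs k).1.getD cs[k] 0 + 1)).getD cs[k - LN] 0 - 1)).getD c' 0
            = ((pvW cs LN (k+1)).count c' : Int) := by
          intro c'
          by_cases hc' : c' = cs[k - LN]
          · subst hc'
            rw [PySem.Dict.getD_insert_self, hmid, hWm]
            simp [List.count_cons_self]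
          · rw [PySem.Dict.getD_insert_of_ne _ _ _ hc', hmid, hWm]
            simp [Ne.symm hc']
        have hd2 : (if (((pvB mL mn cs k).1.insert cs[k]
              ((pvB mL mn cs k).1.getD cs[k] 0 + 1)).insert cs[k - LN]
              (((pvB mL mn cs k).1.insert cs[k]
                ((pvB mL mn cs k).1.getD cs[k] 0 + 1)).getD cs[k - LN] 0 - 1)).getD cs[k - LN] 0 = 0
            then (if ((pvB mL mn cs k).1.insert cs[k]
                  ((pvB mL mn cs k).1.getD cs[k] 0 + 1)).getD cs[k] 0 = 1
                then (pvB mL mn cs k).2.1 + 1 else (pvB mL mn cs k).2.1) - 1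
            else (if ((pvB mL mn cs k).1.insert cs[k]
                  ((pvB mL mn cs k).1.getD cs[k] 0 + 1)).getD cs[k] 0 = 1
                then (pvB mL mn cs k).2.1 + 1 else (pvB mL mn cs k).2.1))
            = ((pvW cs LN (k+1)).toFinset.card : Int) := by
          rw [hc2 cs[k - LN], hdadd, hWm, List.toFinset_cons]
          by_cases hmo : cs[k - LN] ∈ pvW cs LN (k+1)
          · rw [if_neg (by have := List.count_pos_iff.mpr hmo; omega),
                Finset.card_insert_of_mem (List.mem_toFinset.mpr hmo)]
          · rw [if_pos (by rw [List.count_eq_zero.mpr hmo]; rfl),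
                Finset.card_insert_of_notMem (fun h => hmo (List.mem_toFinset.mp h))]
            push_cast; ring
        simp only []
        rw [hAset, hd2]
        by_cases hcond : (((pvW cs LN (k+1)).toFinset.card : Nat) : Int) ≤ mL
        · rw [if_pos (⟨by omega, hcond⟩ : (max mn 1) - 1 ≤ (k:Int) ∧ _), if_pos hcond,
              pv_freq_insert_eq, hq1, hslice]
          refine ⟨htl, rfl, hc2, rfl, ?_, ?_, fun h => absurd hbig (by omega)⟩
          · rw [pv_if_lt_max, ibst,
              pv_best_insert _ ind _ _ (by omega :
                (pvA mL mn mx cs k).1.getD (pvW cs LN (k+1)) 0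
                  ≤ (pvA mL mn mx cs k).1.getD (pvW cs LN (k+1)) 0 + 1)]
          · exact PySem.Dict.nodup_keys_insert _ _ _ ind
        · rw [if_neg (fun hand => hcond hand.2), if_neg hcond]
          refine ⟨?_, rfl, hc2, rfl, ibst, ind, fun h => absurd hbig (by omega)⟩
          rw [hq1]; exact htl
      · -- the first full window: nothing leaves yet
        rw [if_neg (show ¬ (max mn 1) ≤ (k:Int) by omega)]
        have hW1 : pvW cs LN k ++ [cs[k]] = pvW cs LN (k+1) := by
          unfold pvW
          rw [htake, List.drop_append_of_le_length (by rw [hlentake]; omega)]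
          congr 2; omega
        have hc2 : ∀ c', ((pvB mL mn cs k).1.insert cs[k]
              ((pvB mL mn cs k).1.getD cs[k] 0 + 1)).getD c' 0
            = ((pvW cs LN (k+1)).count c' : Int) := by
          intro c'; rw [hmid, hW1]
        have hd2 : (if ((pvB mL mn cs k).1.insert cs[k]
              ((pvB mL mn cs k).1.getD cs[k] 0 + 1)).getD cs[k] 0 = 1
            then (pvB mL mn cs k).2.1 + 1 else (pvB mL mn cs k).2.1)
            = ((pvW cs LN (k+1)).toFinset.card : Int) := by
          rw [hdadd, hW1]
        simp only []
        rw [hAset, hd2]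
        by_cases hcond : (((pvW cs LN (k+1)).toFinset.card : Nat) : Int) ≤ mL
        · rw [if_pos (⟨by omega, hcond⟩ : (max mn 1) - 1 ≤ (k:Int) ∧ _), if_pos hcond,
              pv_freq_insert_eq, hq1, hslice]
          refine ⟨htl, rfl, hc2, rfl, ?_, ?_, fun h => absurd hbig (by omega)⟩
          · rw [pv_if_lt_max, ibst,
              pv_best_insert _ ind _ _ (by omega :
                (pvA mL mn mx cs k).1.getD (pvW cs LN (k+1)) 0
                  ≤ (pvA mL mn mx cs k).1.getD (pvW cs LN (k+1)) 0 + 1)]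
          · exact PySem.Dict.nodup_keys_insert _ _ _ ind
        · rw [if_neg (fun hand => hcond hand.2), if_neg hcond]
          refine ⟨?_, rfl, hc2, rfl, ibst, ind, fun h => absurd hbig (by omega)⟩
          rw [hq1]; exact htl
    · -- still growing: neither side records
      have hW1 : pvW cs LN (k+1) = pvW cs LN k ++ [cs[k]] := by
        unfold pvW
        rw [htake, List.drop_append_of_le_length (by rw [hlentake]; omega)]
        congr 2; omega
      rw [if_neg (by rw [hq1, hWlen1]; intro hand; omega)]
      rw [if_neg (by intro hand; have := hand.1; omega)]
      rw [if_neg (by omega : ¬ ((max mn 1) ≤ (k:Int)))]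
      refine ⟨?_, rfl, ?_, ?_, ibst, ind, fun _ => iemp (by omega)⟩
      · -- queue component
        rw [hq1]; unfold pvW pvQ
        show List.drop (k + 1 - LN) (List.take (k + 1) cs)
          = List.drop (k + 1 + 1 - LN) (List.take (k + 1) cs)
        congr 1
        omega
      · -- counts
        intro c'; rw [hW1]; exact hmid c'
      · -- distinct
        rw [hW1]; exact hdadd

-- final extraction: A's key-indexed max loop is the running max of the values
theorem pv_extract (F : PySem.Dict (List Char) Int) (hnd : F.keys.Nodup) :
    (PySem.List.enumerate F.keys 0).foldl (fun m p => max (F.getD p.2 0) m) 0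
      = F.values.foldl (fun m v => max m v) 0 := by
  have h1 : ((PySem.List.enumerate F.keys 0).map (fun p => p.2)).foldl
      (fun m k => max (F.getD k 0) m) 0
      = (PySem.List.enumerate F.keys 0).foldl (fun m p => max (F.getD p.2 0) m) 0 :=
    List.foldl_map
  rw [← h1, PySem.List.map_snd_enumerate]
  have h2 : (F.keys.map (fun k => F.getD k 0)).foldl (fun m v => max v m) 0
      = F.keys.foldl (fun m k => max (F.getD k 0) m) 0 := List.foldl_map
  rw [← h2, ← PySem.Dict.values_eq_map_keys F hnd 0]
  exact pv_foldl_flip_max _ _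

-- when even the shortest admissible window is longer than maxSize, A never records anything
theorem pv_deg (mL mn mx : Int) (cs : List Char) (hmx : mx < max mn 1) :
    ∀ k, k ≤ cs.length → pvA mL mn mx cs k = (PySem.Dict.empty, cs.take k) := by
  intro k
  induction k with
  | zero => intro _; simp [pvA, pvInitA]
  | succ k ih =>
    intro hk
    rw [pvA_succ mL mn mx cs k (by omega), ih (by omega)]
    simp only [stepA]
    rw [if_neg]
    · have h3 : List.take (k+1) cs = List.take k cs ++ [cs[k]] := by
        rw [List.take_add_one, List.getElem?_eq_getElem (by omega : k < cs.length)]; rfl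
      rw [h3]
      rfl
    · simp only [PySem.List.len_eq, List.length_append, List.length_take,
        List.length_singleton]
      omega

theorem pvA_unfold (s : String) (mL mn mx : Int) :
    maxFreq s mL mn mx =
      (PySem.List.enumerate (pvA mL mn mx s.toList s.toList.length).1.keys 0).foldl
        (fun m p => max ((pvA mL mn mx s.toList s.toList.length).1.getD p.2 0) m) 0 := by
  simp only [maxFreq, PySem.Str.len_eq]
  rw [PySem.List.foldl_pyRange_pyGetD' s.toList ' ' (stepA mL mn mx)
        (PySem.Dict.empty, []) (le_refl 0)]
  simp only [pvA, pvInitA, List.take_length, Int.toNat_zero, List.drop_zero]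

theorem pvB_unfold (s : String) (mL mn mx : Int) (h1 : max mn 1 ≤ mx)
    (h2 : max mn 1 ≤ (s.toList.length : Int)) :
    maxFreq_alt s mL mn mx = (pvB mL mn s.toList s.toList.length).2.2.2 := by
  simp only [maxFreq_alt, PySem.Str.len_eq]
  rw [if_neg (by omega)]
  simp only [pvB, pvInitB, List.take_length]

-- ===== VERDICT (by name: the statement is the Claim_ definition above) =====
theorem maxFreq_spec : Claim_equal_maxFreq := by
  intro s mL mn mx _hdom
  unfold Spec_maxFreq
  by_cases h1 : mx < max mn 1
  · have hB : maxFreq_alt s mL mn mx = 0 := by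
      simp only [maxFreq_alt, PySem.Str.len_eq]; rw [if_pos (Or.inl h1)]
    have hF : (pvA mL mn mx s.toList s.toList.length).1 = PySem.Dict.empty := by
      rw [pv_deg mL mn mx s.toList h1 _ le_rfl]
    rw [hB, pvA_unfold, hF]
    simp
  · by_cases h2 : (s.toList.length : Int) < max mn 1
    · have hB : maxFreq_alt s mL mn mx = 0 := by
        simp only [maxFreq_alt, PySem.Str.len_eq]; rw [if_pos (Or.inr h2)]
      have inv := pv_inv mL mn mx s.toList (not_lt.mp h1) s.toList.length le_rfl
      have hF : (pvA mL mn mx s.toList s.toList.length).1 = PySem.Dict.empty :=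
        inv.2.2.2.2.2.2 (by omega)
      rw [hB, pvA_unfold, hF]
      simp
    · have inv := pv_inv mL mn mx s.toList (not_lt.mp h1) s.toList.length le_rfl
      rw [pvB_unfold s mL mn mx (not_lt.mp h1) (not_lt.mp h2), pvA_unfold]
      rw [pv_extract _ inv.2.2.2.2.2.1]
      exact inv.2.2.2.2.1.symm
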